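-- pv_equiv track=rewrite | github.com/ioan-gwenter/ImageConvolution | cwk1/image_processor.py | __pad_image
-- ===== SOURCE A (Python) =====
-- from typing import List, Optional, Tuple
--
-- def __pad_image(kernel_size: int, image: List[List[int]]) -> List[List[int]]:
--
--     if not image or not image[0]:
--         raise ValueError("Input image cannot be empty")
--
--     if kernel_size < 1 or kernel_size % 2 == 0:
--         raise ValueError("Kernel size must be a positive odd integer")
--
--     img_height = len(image)
--     img_width = len(image[0])
--     pad_size = kernel_size // 2
--
--     # create a padded zeroed array for the image
--     padded_image = [[0] * (img_width + 2 * pad_size) for _ in range(img_height + 2 * pad_size)]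
--
--     # Copy the image over to the array
--     for row in range(img_height):
--         for col in range(img_width):
--             padded_image[row + pad_size][col + pad_size] = image[row][col]
--
--     return padded_image
-- ===== SOURCE B (Python) =====
-- from typing import List
--
--
-- def __pad_image(kernel_size: int, image: List[List[int]]) -> List[List[int]]:
--
--     if not image or not image[0]:
--         raise ValueError("Input image cannot be empty")
--
--     if kernel_size < 1 or kernel_size % 2 == 0:
--         raise ValueError("Kernel size must be a positive odd integer")
--
--     pad_size = kernel_size // 2
--     img_width = len(image[0])
--     padded_width = img_width + 2 * pad_size
--
--     top = [[0] * padded_width for _ in range(pad_size)]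
--     middle = [[0] * pad_size + row[:img_width] + [0] * pad_size for row in image]
--     bottom = [[0] * padded_width for _ in range(pad_size)]
--     return top + middle + bottom
-- ===== Notes on version B (the rewrite author's own statement) =====
-- stated objective: idiomatic
-- what changed: Replaces A's preallocated zero grid plus nested per-pixel copy loop with a block construction: pad_size zero rows, each row cropped to the image width and padded by list concatenation, pad_size zero rows, concatenated once.
import Mathlib
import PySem

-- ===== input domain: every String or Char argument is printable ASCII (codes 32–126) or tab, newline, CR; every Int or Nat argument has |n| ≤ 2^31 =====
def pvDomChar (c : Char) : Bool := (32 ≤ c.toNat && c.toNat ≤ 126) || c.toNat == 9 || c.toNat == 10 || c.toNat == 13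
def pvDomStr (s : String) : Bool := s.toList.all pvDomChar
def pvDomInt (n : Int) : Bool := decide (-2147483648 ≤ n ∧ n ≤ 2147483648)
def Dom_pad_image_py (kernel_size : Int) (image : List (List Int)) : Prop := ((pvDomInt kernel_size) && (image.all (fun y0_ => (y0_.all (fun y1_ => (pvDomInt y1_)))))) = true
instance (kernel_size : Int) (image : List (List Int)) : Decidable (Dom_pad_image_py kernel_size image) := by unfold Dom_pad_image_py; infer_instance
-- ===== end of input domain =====

-- B replaces A's preallocated zero grid + nested pixel-copy loop with a block construction
-- (zero-row blocks concatenated around per-row concatenation padding, rows cropped to the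
-- first row's width, as A's copy loop does); objective: idiomatic.
-- Neither implementation mutates its arguments.

-- ===== PORT A =====
-- Literal transliteration of A: both `raise ValueError` branches return [] (excluded by Pre_);
-- `image[row][col]` is in range on Pre_, ported with getD (default never reached inside Pre_).
def pad_image_py (kernel_size : Int) (image : List (List Int)) : List (List Int) :=
  if image = [] ∨ image.headD [] = [] then []
  else if kernel_size < 1 ∨ PySem.Int.mod kernel_size 2 = 0 then []
  else
    let img_height := image.length
    let img_width := (image.headD []).length
    let pad_size := (PySem.Int.floordiv kernel_size 2).toNat
    let padded_image := List.replicate (img_height + 2 * pad_size) (List.replicate (img_width + 2 * pad_size) (0 : Int))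
    (List.range img_height).foldl (fun g row =>
      (List.range img_width).foldl (fun g col =>
        g.modify (row + pad_size) (fun r => r.set (col + pad_size) ((image.getD row []).getD col 0))) g) padded_image

-- ===== PORT B =====
-- Literal transliteration of Source B ([0]*n → List.replicate, row[:img_width] → PySem.List.slice,
-- list concatenation → ++).
def pad_image_py_alt (kernel_size : Int) (image : List (List Int)) : List (List Int) :=
  if image = [] ∨ image.headD [] = [] then []
  else if kernel_size < 1 ∨ PySem.Int.mod kernel_size 2 = 0 then []
  else
    let pad_size := (PySem.Int.floordiv kernel_size 2).toNat
    let img_width := (image.headD []).length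
    let padded_width := img_width + 2 * pad_size
    let top := List.replicate pad_size (List.replicate padded_width (0 : Int))
    let middle := image.map (fun row =>
      List.replicate pad_size (0 : Int) ++ PySem.List.slice row none (some (img_width : Int)) ++
        List.replicate pad_size (0 : Int))
    let bottom := List.replicate pad_size (List.replicate padded_width (0 : Int))
    top ++ middle ++ bottom

-- ===== PRECONDITION & SPEC =====
-- Pre_ excludes exactly the inputs where A raises: ValueError on an empty image / empty first
-- row / non-positive or even kernel, and IndexError when some row is shorter than the first row.
def Pre_pad_image_py (kernel_size : Int) (image : List (List Int)) : Prop :=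
  image ≠ [] ∧ image.headD [] ≠ [] ∧ 1 ≤ kernel_size ∧ PySem.Int.mod kernel_size 2 = 1 ∧
  ∀ r ∈ image, (image.headD []).length ≤ r.length
instance (kernel_size : Int) (image : List (List Int)) : Decidable (Pre_pad_image_py kernel_size image) := by unfold Pre_pad_image_py; infer_instance
def pvWitness_pad_image_py : Int × List (List Int) := (3, [[1, 2], [3, 4]])

def Spec_pad_image_py (kernel_size : Int) (image : List (List Int)) (out : List (List Int)) : Prop := out = pad_image_py_alt kernel_size image
instance (kernel_size : Int) (image : List (List Int)) (out : List (List Int)) : Decidable (Spec_pad_image_py kernel_size image out) := by unfold Spec_pad_image_py; infer_instance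

-- ===== CLAIM (what is proved, stated in full; the proofs are below) =====
def Claim_equal_pad_image_py : Prop := ∀ (kernel_size : Int) (image : List (List Int)), Dom_pad_image_py kernel_size image → Pre_pad_image_py kernel_size image → Spec_pad_image_py kernel_size image (pad_image_py kernel_size image)

-- ===== LEMMAS AND PROOFS =====

-- value of a fold of single-index `modify`s over `range n` (each index p..n+p-1 touched once)
theorem pv_foldl_modify_getElem? {α : Type} (F : Nat → α → α) (p : Nat) :
    ∀ (n : Nat) (g : List α) (j : Nat),
      ((List.range n).foldl (fun g c => g.modify (c + p) (F c)) g)[j]? =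
        if p ≤ j ∧ j < n + p then g[j]?.map (F (j - p)) else g[j]? := by
  intro n
  induction n with
  | zero => intro g j; rw [List.range_zero, List.foldl_nil, if_neg (by omega)]
  | succ n ih =>
    intro g j
    rw [List.range_succ, List.foldl_append]
    simp only [List.foldl_cons, List.foldl_nil, List.getElem?_modify, ih]
    by_cases hj : j = n + p
    · subst hj
      have : ¬ (p ≤ n + p ∧ n + p < n + p) := by omega
      rw [if_neg this, if_pos (by omega)]
      cases g[n + p]? with
      | none => simp
      | some a => simp
    · by_cases h2 : p ≤ j ∧ j < n + p
      · rw [if_pos h2, if_pos (by omega)]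
        cases g[j]? with
        | none => simp
        | some a => simp [Ne.symm hj]
      · rw [if_neg h2, if_neg (by omega)]
        cases g[j]? with
        | none => simp
        | some a => simp [Ne.symm hj]

-- the inner column loop turns a zero row into [0]*p ++ src.take w ++ [0]*p
theorem pv_inner_loop (src : List Int) (p w : Nat) (hw : w ≤ src.length) :
    (List.range w).foldl (fun r c => r.set (c + p) (src.getD c 0))
        (List.replicate (w + 2 * p) (0 : Int)) =
      List.replicate p 0 ++ src.take w ++ List.replicate p 0 := by
  have hset : (fun (r : List Int) (c : Nat) => r.set (c + p) (src.getD c 0)) =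
      (fun (r : List Int) (c : Nat) => r.modify (c + p) ((fun c _ => src.getD c 0) c)) := by
    funext r c
    exact List.set_eq_modify _ _ _
  rw [hset]
  apply List.ext_getElem?
  intro j
  rw [pv_foldl_modify_getElem?]
  by_cases h1 : p ≤ j ∧ j < w + p
  · rw [if_pos h1]
    have hjlt : j < w + 2 * p := by omega
    have hjp : j - p < src.length := by omega
    rw [List.getElem?_replicate, if_pos hjlt]
    simp only [Option.map_some]
    rw [List.getElem?_append_left (by simp; omega), List.getElem?_append_right (by simp; omega)]
    simp only [List.length_replicate]
    rw [List.getD_eq_getElem?_getD, List.getElem?_eq_getElem hjp, Option.getD_some,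
      List.getElem?_take_of_lt (by omega), List.getElem?_eq_getElem hjp]
  · rw [if_neg h1]
    by_cases h2 : j < p
    · rw [List.getElem?_replicate, if_pos (by omega),
        List.getElem?_append_left (by simp; omega), List.getElem?_append_left (by simp; omega),
        List.getElem?_replicate, if_pos h2]
    · by_cases h3 : j < w + 2 * p
      · rw [List.getElem?_replicate, if_pos h3,
          List.getElem?_append_right (by simp; omega),
          List.getElem?_replicate, if_pos (by simp; omega)]
      · rw [List.getElem?_replicate, if_neg (by omega),
          List.getElem?_eq_none_iff.mpr (by simp; omega)]

theorem pv_modify_modify {α : Type} (l : List α) (i : Nat) (f g : α → α) :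
    (l.modify i f).modify i g = l.modify i (fun x => g (f x)) := by
  apply List.ext_getElem?
  intro j
  simp only [List.getElem?_modify]
  cases l[j]? with
  | none => simp
  | some a => by_cases h : i = j <;> simp [h]

-- the inner loop collapses to one `modify` of the whole grid
theorem pv_inner_collapse (g : List (List Int)) (src : List Int) (p w i : Nat) :
    (List.range w).foldl (fun g col =>
        g.modify i (fun r => r.set (col + p) (src.getD col 0))) g =
      g.modify i (fun r => (List.range w).foldl (fun r col => r.set (col + p) (src.getD col 0)) r) := by
  induction w with
  | zero =>
    simp only [List.range_zero, List.foldl_nil]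
    apply List.ext_getElem?
    intro j
    simp [List.getElem?_modify]
  | succ w ih =>
    simp only [List.range_succ, List.foldl_append, List.foldl_cons, List.foldl_nil, ih]
    rw [pv_modify_modify]

theorem pv_guard_neg (kernel_size : Int) (h1 : 1 ≤ kernel_size)
    (h2 : PySem.Int.mod kernel_size 2 = 1) :
    ¬ (kernel_size < 1 ∨ PySem.Int.mod kernel_size 2 = 0) := by
  push_neg
  exact ⟨by omega, by rw [h2]; decide⟩

-- A's grid entries after the row loop, elementwise
theorem pv_grid_getElem? (image : List (List Int)) (p h w : Nat)
    (hh : image.length = h) (j : Nat) :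
    ((List.range h).foldl (fun g row =>
        (List.range w).foldl (fun g col =>
          g.modify (row + p) (fun r => r.set (col + p) ((image.getD row []).getD col 0))) g)
        (List.replicate (h + 2 * p) (List.replicate (w + 2 * p) (0 : Int))))[j]? =
      if p ≤ j ∧ j < h + p then
        some ((List.range w).foldl (fun r col => r.set (col + p) ((image.getD (j - p) []).getD col 0))
          (List.replicate (w + 2 * p) (0 : Int)))
      else if j < h + 2 * p then some (List.replicate (w + 2 * p) (0 : Int)) else none := by
  have hc : (fun (g : List (List Int)) (row : Nat) =>
      (List.range w).foldl (fun g col =>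
        g.modify (row + p) (fun r => r.set (col + p) ((image.getD row []).getD col 0))) g) =
      (fun (g : List (List Int)) (row : Nat) =>
        g.modify (row + p)
          ((fun row r => (List.range w).foldl (fun r col => r.set (col + p) ((image.getD row []).getD col 0)) r) row)) := by
    funext g row
    exact pv_inner_collapse g (image.getD row []) p w (row + p)
  rw [hc, pv_foldl_modify_getElem?]
  by_cases h1 : p ≤ j ∧ j < h + p
  · rw [if_pos h1, if_pos h1, List.getElem?_replicate, if_pos (by omega)]
    simp
  · rw [if_neg h1, if_neg h1, List.getElem?_replicate]

-- ===== VERDICT =====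
theorem pad_image_py_spec : Claim_equal_pad_image_py := by
  intro kernel_size image _hDom hPre
  obtain ⟨h1, h2, h3, h4, h5⟩ := hPre
  unfold Spec_pad_image_py pad_image_py pad_image_py_alt
  have hg1 : ¬ (image = [] ∨ image.headD [] = []) := by push_neg; exact ⟨h1, h2⟩
  rw [if_neg hg1, if_neg (pv_guard_neg kernel_size h3 h4),
    if_neg hg1, if_neg (pv_guard_neg kernel_size h3 h4)]
  simp only []
  set p := (PySem.Int.floordiv kernel_size 2).toNat with hp
  set h := image.length with hhdef
  set w := (image.headD []).length with hwdef
  apply List.ext_getElem?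
  intro j
  rw [pv_grid_getElem? image p h w rfl j]
  by_cases c1 : p ≤ j ∧ j < h + p
  · rw [if_pos c1]
    have hjp : j - p < image.length := by omega
    have hsrc : image.getD (j - p) [] = image[j - p] := by
      rw [List.getD_eq_getElem?_getD, List.getElem?_eq_getElem hjp, Option.getD_some]
    have hlen : w ≤ (image.getD (j - p) []).length := by
      rw [hsrc]; exact h5 _ (List.getElem_mem hjp)
    rw [pv_inner_loop (image.getD (j - p) []) p w hlen]
    rw [List.getElem?_append_left (by simp [hhdef]; omega),
      List.getElem?_append_right (by simp; omega)]
    simp only [List.length_replicate, List.getElem?_map]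
    rw [List.getElem?_eq_getElem (by simpa using hjp)]
    simp only [Option.map_some, PySem.List.slice_to_natCast]
    rw [hsrc]
  · rw [if_neg c1]
    by_cases c2 : j < p
    · rw [if_pos (by omega), List.getElem?_append_left (by simp [hhdef]; omega),
        List.getElem?_append_left (by simp; omega), List.getElem?_replicate, if_pos c2]
    · by_cases c3 : j < h + 2 * p
      · rw [if_pos c3,
          List.getElem?_append_right (by simp [hhdef]; omega),
          List.getElem?_replicate, if_pos (by simp [hhdef]; omega)]
      · rw [if_neg c3, List.getElem?_eq_none_iff.mpr (by simp [hhdef]; omega)]
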